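-- pv_equiv track=rewrite | github.com/williamjowens/leetcode-practice | python/equal_row_column_pairs.py | generate_dynamic_explanations
-- ===== SOURCE A (Python) =====
-- def generate_dynamic_explanations(grid, count):
--     rows = [''.join(map(str, row)) for row in grid]
--     columns = [''.join(str(grid[row][col]) for row in range(len(grid))) for col in range(len(grid[0]))]
--
--     matches = []
--     for i, row in enumerate(rows):
--         for j, col in enumerate(columns):
--             if row == col:
--                 matches.append((i, j))
--
--     explanation = f"There {'is' if count == 1 else 'are'} {count} equal row and column pair{'' if count == 1 else 's'}:"
--     for ri, cj in matches:
--         explanation += f"\n- (Row {ri}, Column {cj}): [{', '.join(map(str, grid[ri]))}]"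
--
--     return explanation
-- ===== SOURCE B (Python) =====
-- def generate_dynamic_explanations(grid, count):
--     cols = [''.join(str(row[j]) for row in grid) for j in range(len(grid[0]))]
--     col_index = {}
--     for j, s in enumerate(cols):
--         col_index.setdefault(s, []).append(j)
--     lines = []
--     for i, row in enumerate(grid):
--         for j in col_index.get(''.join(map(str, row)), []):
--             lines.append(f"\n- (Row {i}, Column {j}): [{', '.join(map(str, row))}]")
--     head = f"There {'is' if count == 1 else 'are'} {count} equal row and column pair{'' if count == 1 else 's'}:"
--     return head + ''.join(lines)
-- ===== Notes on version B (the rewrite author's own statement) =====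
-- stated objective: alternative
-- what changed: Replaces the nested row-by-column string-comparison scan with a dict mapping each column string to its ascending column indices (one lookup per row), and assembles the output by join instead of repeated +=; not measurably faster because output construction dominates.
import Mathlib
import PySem

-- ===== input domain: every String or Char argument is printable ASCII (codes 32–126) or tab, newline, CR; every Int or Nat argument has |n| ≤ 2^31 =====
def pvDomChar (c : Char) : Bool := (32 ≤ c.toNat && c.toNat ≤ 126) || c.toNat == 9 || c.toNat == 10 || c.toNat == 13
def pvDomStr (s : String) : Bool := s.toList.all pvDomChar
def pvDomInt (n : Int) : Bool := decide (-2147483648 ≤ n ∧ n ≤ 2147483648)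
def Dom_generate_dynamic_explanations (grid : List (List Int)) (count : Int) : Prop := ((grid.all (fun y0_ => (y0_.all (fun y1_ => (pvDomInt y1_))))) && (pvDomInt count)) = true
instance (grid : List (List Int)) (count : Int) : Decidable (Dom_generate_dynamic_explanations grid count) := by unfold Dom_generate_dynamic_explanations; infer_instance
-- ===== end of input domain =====

-- B replaces A's nested row-by-column string-comparison scan with a dict from column
-- string to its ascending column indices (one lookup per row) and assembles the output
-- by join instead of repeated append (alternative algorithm; not measured faster).

-- ===== PORT A =====
-- shared formatting helpers (identical text in both Pythons)
def pvHeader (count : Int) : String :=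
  "There " ++ (if count == 1 then "is" else "are") ++ " " ++ PySem.Int.toStr count ++
    " equal row and column pair" ++ (if count == 1 then "" else "s") ++ ":"

def pvRowStr (row : List Int) : String := PySem.Str.join "" (row.map PySem.Int.toStr)

-- str(grid[row][col]) joined down column c; row.getD c 0 is in range under Pre_
def pvColStr (grid : List (List Int)) (c : Nat) : String :=
  PySem.Str.join "" (grid.map (fun row => PySem.Int.toStr (row.getD c 0)))

-- A's line: indexes grid[ri] again
def pvLineA (grid : List (List Int)) (ri cj : Int) : String :=
  "\n- (Row " ++ PySem.Int.toStr ri ++ ", Column " ++ PySem.Int.toStr cj ++ "): [" ++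
    PySem.Str.join ", " ((PySem.List.pyGetD grid ri []).map PySem.Int.toStr) ++ "]"

def generate_dynamic_explanations (grid : List (List Int)) (count : Int) : String :=
  let rows := grid.map pvRowStr
  let columns := (List.range (grid.headD []).length).map (pvColStr grid)
  let ms : List (Int × Int) :=
    (PySem.List.enumerate rows).foldl (fun acc ir =>
      (PySem.List.enumerate columns).foldl (fun acc2 jc =>
        if ir.2 == jc.2 then acc2 ++ [(ir.1, jc.1)] else acc2) acc) []
  ms.foldl (fun e m => e ++ pvLineA grid m.1 m.2) (pvHeader count)

-- ===== PORT B =====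
-- B's line: uses the row it already has in hand
def pvLineB (i j : Int) (row : List Int) : String :=
  "\n- (Row " ++ PySem.Int.toStr i ++ ", Column " ++ PySem.Int.toStr j ++ "): [" ++
    PySem.Str.join ", " (row.map PySem.Int.toStr) ++ "]"

-- col_index.setdefault(s, []).append(j)
def pvColIndex (columns : List String) : PySem.Dict String (List Int) :=
  (PySem.List.enumerate columns).foldl
    (fun d jc => d.modify jc.2 [] (· ++ [jc.1])) PySem.Dict.empty

def generate_dynamic_explanations_alt (grid : List (List Int)) (count : Int) : String :=
  let columns := (List.range (grid.headD []).length).map (pvColStr grid)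
  let idx := pvColIndex columns
  let lines : List String :=
    (PySem.List.enumerate grid).flatMap (fun ir =>
      (idx.getD (pvRowStr ir.2) []).map (fun j => pvLineB ir.1 j ir.2))
  pvHeader count ++ String.join lines

-- ===== PRECONDITION & SPEC =====
-- Pre_ excludes exactly the inputs where both Pythons raise IndexError:
-- an empty grid (grid[0]) and rows shorter than the first row (grid[row][col]).
def Pre_generate_dynamic_explanations (grid : List (List Int)) (count : Int) : Prop :=
  grid ≠ [] ∧ ∀ row ∈ grid, (grid.headD []).length ≤ row.length

instance (grid : List (List Int)) (count : Int) : Decidable (Pre_generate_dynamic_explanations grid count) := by unfold Pre_generate_dynamic_explanations; infer_instance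

def pvWitness_generate_dynamic_explanations : List (List Int) × Int := ([[3, 2, 1], [1, 7, 6], [2, 7, 7]], 1)

def Spec_generate_dynamic_explanations (grid : List (List Int)) (count : Int) (out : String) : Prop := out = generate_dynamic_explanations_alt grid count
instance (grid : List (List Int)) (count : Int) (out : String) : Decidable (Spec_generate_dynamic_explanations grid count out) := by unfold Spec_generate_dynamic_explanations; infer_instance

-- ===== CLAIM (what is proved, stated in full; the proofs are below) =====
def Claim_equal_generate_dynamic_explanations : Prop := ∀ (grid : List (List Int)) (count : Int), Dom_generate_dynamic_explanations grid count → Pre_generate_dynamic_explanations grid count → Spec_generate_dynamic_explanations grid count (generate_dynamic_explanations grid count)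

-- ===== LEMMAS AND PROOFS =====

-- 'explanation += line' loop = header ++ join of the lines
theorem pv_join_cons (a : String) (l : List String) : String.join (a :: l) = a ++ String.join l := by
  induction l generalizing a with
  | nil => simp [String.join]
  | cons b t ih =>
    show String.join ((a ++ b) :: t) = _
    rw [ih, ih b, String.append_assoc]

theorem pv_foldl_append_join {α : Type} (l : List α) (f : α → String) (a : String) :
    l.foldl (fun acc x => acc ++ f x) a = a ++ String.join (l.map f) := by
  induction l generalizing a with
  | nil => simp [String.join, String.append_empty]
  | cons x t ih => rw [List.foldl_cons, ih, List.map_cons, pv_join_cons, String.append_assoc]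

-- enumerate commutes with map (on the payload)
theorem pv_enumerate_map {α β : Type} (f : α → β) (l : List α) (s : Int) :
    PySem.List.enumerate (l.map f) s = (PySem.List.enumerate l s).map (fun p => (p.1, f p.2)) := by
  induction l generalizing s with
  | nil => simp [PySem.List.enumerate_nil]
  | cons x t ih => simp [PySem.List.enumerate_cons, ih]

-- the dict built by pvColIndex answers: all column indices whose string equals s, ascending
theorem pv_colIndex_getD (columns : List String) (s : String) :
    (pvColIndex columns).getD s []
      = ((PySem.List.enumerate columns).filter (fun jc => jc.2 == s)).map (·.1) := by
  unfold pvColIndex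
  have h : (PySem.List.enumerate columns).foldl
        (fun d jc => d.modify jc.2 [] (· ++ [jc.1])) PySem.Dict.empty
      = ((PySem.List.enumerate columns).map (fun jc => (jc.2, jc.1))).foldl
        (fun d p => d.modify p.1 [] (· ++ [p.2])) PySem.Dict.empty := by
    rw [List.foldl_map]
  rw [h, PySem.Dict.getD_foldl_modify_append, PySem.Dict.getD_empty]
  simp [List.filter_map, List.map_map, Function.comp_def]

theorem pv_grid_getD (grid : List (List Int)) (p : Int × List Int)
    (hp : p ∈ PySem.List.enumerate grid 0) : PySem.List.pyGetD grid p.1 [] = p.2 := by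
  rcases (PySem.List.mem_enumerate_iff grid 0 p).1 hp with ⟨k, hk, rfl⟩
  simp [PySem.List.pyGetD_natCast, List.getD_eq_getElem?_getD, hk]

-- ===== VERDICT (by name: the statement is the Claim_ definition above) =====
theorem generate_dynamic_explanations_spec : Claim_equal_generate_dynamic_explanations := by
  intro grid count _ _
  unfold Spec_generate_dynamic_explanations generate_dynamic_explanations generate_dynamic_explanations_alt
  simp only []
  -- name the shared pieces
  set columns := (List.range (grid.headD []).length).map (pvColStr grid) with hcol
  -- A's matches as a flatMap over the grid
  rw [pv_enumerate_map pvRowStr grid 0, List.foldl_map]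
  have hinner : ∀ (acc : List (Int × Int)) (p : Int × List Int),
      (PySem.List.enumerate columns).foldl (fun acc2 jc =>
        if pvRowStr p.2 == jc.2 then acc2 ++ [(p.1, jc.1)] else acc2) acc
      = acc ++ ((PySem.List.enumerate columns).filter
          (fun jc => pvRowStr p.2 == jc.2)).map (fun jc => (p.1, jc.1)) := by
    intro acc p
    exact PySem.List.foldl_append_if _ _ _ _
  simp only [hinner]
  rw [PySem.List.foldl_append_eq_flatMap, List.nil_append]
  rw [pv_foldl_append_join]
  congr 1
  rw [List.map_flatMap]
  congr 1
  apply List.flatMap_congr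
  intro p hp
  rw [pv_colIndex_getD]
  simp only [List.map_map]
  have hpred : ((PySem.List.enumerate columns).filter (fun jc => pvRowStr p.2 == jc.2))
      = ((PySem.List.enumerate columns).filter (fun jc => jc.2 == pvRowStr p.2)) := by
    apply List.filter_congr
    intro x _
    exact Bool.beq_comm
  rw [hpred]
  apply List.map_congr_left
  intro jc _
  simp only [Function.comp_def]
  unfold pvLineA pvLineB
  rw [pv_grid_getD grid p hp]
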